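-- pv_equiv track=rewrite | github.com/william01424/CodeWarsAnswers | Paul's_Misery.py | paul
-- ===== SOURCE A (Python) =====
-- def paul(x):
--     dict = {'kata':5,
--             'Petes kata':10,
--             'life': 0,
--             'eating' : 1
--             }
--     list_of_scores = []
--     for key, value in dict.items():
--         for i in x:
--             if i == key:
--                 list_of_scores.append(value)
--     if sum(list_of_scores) < 40:
--         return 'Super happy!'
--     elif 40 <= sum(list_of_scores) <70:
--         return 'Happy!'
--     elif 70 <= sum(list_of_scores) <100:
--         return 'Sad!'
--     elif sum(list_of_scores) >= 100:
--         return 'Miserable!'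
-- ===== SOURCE B (Python) =====
-- def paul(x):
--     weights = {'kata': 5, 'Petes kata': 10, 'life': 0, 'eating': 1}
--     score = 0
--     for i in x:
--         score += weights.get(i, 0)
--     thresholds = [40, 70, 100]
--     labels = ['Super happy!', 'Happy!', 'Sad!', 'Miserable!']
--     return labels[sum(t <= score for t in thresholds)]
-- ===== Notes on version B (the rewrite author's own statement) =====
-- stated objective: simpler
-- what changed: B makes one pass over x accumulating the score via a dict lookup (instead of A's nested loop over dict keys and x building a list of scores) and classifies with a threshold-count table lookup instead of the if/elif chain.
import Mathlib
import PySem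

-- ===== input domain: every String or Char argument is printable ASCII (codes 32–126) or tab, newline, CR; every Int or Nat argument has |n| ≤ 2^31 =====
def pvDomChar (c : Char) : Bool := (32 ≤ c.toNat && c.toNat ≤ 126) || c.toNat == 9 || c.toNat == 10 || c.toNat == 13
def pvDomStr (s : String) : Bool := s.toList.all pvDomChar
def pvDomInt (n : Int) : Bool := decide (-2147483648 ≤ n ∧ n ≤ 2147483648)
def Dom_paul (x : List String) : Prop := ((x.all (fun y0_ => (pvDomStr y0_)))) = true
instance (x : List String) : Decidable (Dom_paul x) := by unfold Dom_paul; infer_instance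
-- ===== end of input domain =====

-- B replaces A's nested keys×x scan with one pass over x (dict lookup) and a threshold-count classification: simpler, not measured faster.

-- ===== PORT A =====
-- literal port: nested loops (outer over dict items, inner over x) appending matched values,
-- then the if/elif chain on sum(list_of_scores); the chain is exhaustive over Int so the
-- final (unreachable in Python) fall-through default never fires.
def paul (x : List String) : String :=
  let d : List (String × Int) := [("kata", 5), ("Petes kata", 10), ("life", 0), ("eating", 1)]
  let list_of_scores : List Int :=
    d.foldl (fun acc kv =>
      x.foldl (fun acc2 i => if i == kv.1 then acc2 ++ [kv.2] else acc2) acc) []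
  let s := list_of_scores.sum
  if s < 40 then "Super happy!"
  else if 40 ≤ s ∧ s < 70 then "Happy!"
  else if 70 ≤ s ∧ s < 100 then "Sad!"
  else if s ≥ 100 then "Miserable!"
  else ""  -- unreachable: the four conditions cover all of Int

-- ===== PORT B =====
def paul_alt (x : List String) : String :=
  let weights : PySem.Dict String Int := PySem.Dict.ofList [("kata", 5), ("Petes kata", 10), ("life", 0), ("eating", 1)]
  let score : Int := x.foldl (fun s i => s + PySem.Dict.getD weights i 0) 0
  let thresholds : List Int := [40, 70, 100]
  let labels : List String := ["Super happy!", "Happy!", "Sad!", "Miserable!"]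
  let idx : Nat := thresholds.foldl (fun n t => n + (if t ≤ score then 1 else 0)) 0
  labels.getD idx ""  -- labels[idx]: idx ∈ [0,3] always, so in range

-- ===== PRECONDITION & SPEC =====
def Spec_paul (x : List String) (out : String) : Prop := out = paul_alt x
instance (x : List String) (out : String) : Decidable (Spec_paul x out) := by unfold Spec_paul; infer_instance

-- ===== CLAIM (what is proved, stated in full; the proofs are below) =====
def Claim_equal_paul : Prop := ∀ (x : List String), Dom_paul x → Spec_paul x (paul x)

-- ===== LEMMAS AND PROOFS =====

-- A's inner loop over x for one key k/value v: the sum of the accumulated list grows by v * (count of k in x)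
theorem pv_inner_sum (x : List String) (k : String) (v : Int) (acc : List Int) :
    (x.foldl (fun acc2 i => if i == k then acc2 ++ [v] else acc2) acc).sum
      = acc.sum + v * (x.count k) := by
  induction x generalizing acc with
  | nil => simp
  | cons h t ih =>
    simp only [List.foldl_cons]
    by_cases hk : h = k
    · rw [if_pos (by simpa using hk), ih]
      simp [hk]
      ring
    · rw [if_neg (by simpa using hk), ih]
      simp [List.count_cons]
      exact Or.inl hk

-- the literal weight dict, reduced to its item list once
theorem pv_w_eq : PySem.Dict.ofList [("kata", (5:Int)), ("Petes kata", 10), ("life", 0), ("eating", 1)]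
    = PySem.Dict.mk [("kata", 5), ("Petes kata", 10), ("life", 0), ("eating", 1)] := by decide

-- B's single pass over x: the score equals the weighted sum of the key counts
theorem pv_scoreB (x : List String) (s : Int) :
    x.foldl (fun s i => s + PySem.Dict.getD (PySem.Dict.ofList [("kata", (5:Int)), ("Petes kata", 10), ("life", 0), ("eating", 1)]) i 0) s
      = s + 5 * (x.count "kata") + 10 * (x.count "Petes kata") + (x.count "eating") := by
  induction x generalizing s with
  | nil => simp
  | cons h t ih =>
    simp only [List.foldl_cons, ih, List.count_cons]
    by_cases h1 : h = "kata"
    · simp [h1, pv_w_eq, PySem.Dict.getD, PySem.Dict.get?_mk_cons]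
      push_cast
      ring
    · by_cases h2 : h = "Petes kata"
      · simp [h2, pv_w_eq, PySem.Dict.getD, PySem.Dict.get?_mk_cons]
        ring
      · by_cases h3 : h = "life"
        · simp [h3, pv_w_eq, PySem.Dict.getD, PySem.Dict.get?_mk_cons]
        · by_cases h4 : h = "eating"
          · simp [h4, pv_w_eq, PySem.Dict.getD, PySem.Dict.get?_mk_cons]
            ring
          · have n1 : ("kata" : String) ≠ h := fun e => h1 e.symm
            have n2 : ("Petes kata" : String) ≠ h := fun e => h2 e.symm
            have n3 : ("life" : String) ≠ h := fun e => h3 e.symm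
            have n4 : ("eating" : String) ≠ h := fun e => h4 e.symm
            simp [pv_w_eq, PySem.Dict.getD, PySem.Dict.get?,
                  n1, n2, n3, n4, h1, h2, h4]

-- the if/elif chain and the threshold-count table lookup agree on every integer score
theorem pv_classify (s : Int) :
    (if s < 40 then "Super happy!"
     else if 40 ≤ s ∧ s < 70 then "Happy!"
     else if 70 ≤ s ∧ s < 100 then "Sad!"
     else if s ≥ 100 then "Miserable!"
     else "")
      = (["Super happy!", "Happy!", "Sad!", "Miserable!"] : List String).getD
          (((0 + (if (40:Int) ≤ s then 1 else 0)) + (if (70:Int) ≤ s then 1 else 0)) + (if (100:Int) ≤ s then 1 else 0)) "" := by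
  split_ifs <;> first | rfl | omega

-- ===== VERDICT (by name: the statement is the Claim_ definition above) =====
theorem paul_spec : Claim_equal_paul := by
  intro x _
  unfold Spec_paul paul paul_alt
  simp only [List.foldl_cons, List.foldl_nil]
  rw [pv_inner_sum, pv_inner_sum, pv_inner_sum, pv_inner_sum, pv_scoreB]
  have he : (List.sum ([] : List Int)) + 5 * (x.count "kata") + 10 * (x.count "Petes kata")
        + 0 * (x.count "life") + 1 * (x.count "eating")
      = 0 + 5 * (x.count "kata") + 10 * (x.count "Petes kata") + ((x.count "eating" : Nat) : Int) := by
    simp only [List.sum_nil]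
    ring
  rw [he]
  exact pv_classify _
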